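-- pv_equiv track=rewrite | github.com/bssrdf/pyleet | SortFeaturesbyPopularity.py | sortedFeature
-- ===== SOURCE A (Python) =====
-- def sortedFeature(features, responses):
--     m = {}
--     for i,res in enumerate(responses):
--         for w in res.split():
--             if w in m:
--                 m[w] |= 1 << i
--             else:
--                 m[w] = 1 << i
--     def bits(n):
--         cnt = 0
--         while n > 0:
--             cnt += n & 0x1
--             n >>= 1
--         return cnt
--     pairs = []
--     for w in features:
--         if w in m:
--             pairs.append((-bits(m[w]),w))
--         else:
--             pairs.append((0,w))
--     pairs.sort()
--     return [p[1] for p in pairs]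
-- ===== SOURCE B (Python) =====
-- def sortedFeature(features, responses):
--     # Count, for each word, the number of distinct responses containing it,
--     # via one pass with per-response sets (no bitmasks, no popcount loop).
--     cnt = {}
--     for res in responses:
--         for w in set(res.split()):
--             cnt[w] = cnt.get(w, 0) + 1
--     return sorted(features, key=lambda w: (-cnt.get(w, 0), w))
-- ===== Notes on version B (the rewrite author's own statement) =====
-- stated objective: faster
-- what changed: Replaces the per-response bitmask dictionary plus a popcount loop per feature by a single pass that counts distinct responses per word with per-response sets, then sorts the features directly with the key (-count, word).
import Mathlib
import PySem

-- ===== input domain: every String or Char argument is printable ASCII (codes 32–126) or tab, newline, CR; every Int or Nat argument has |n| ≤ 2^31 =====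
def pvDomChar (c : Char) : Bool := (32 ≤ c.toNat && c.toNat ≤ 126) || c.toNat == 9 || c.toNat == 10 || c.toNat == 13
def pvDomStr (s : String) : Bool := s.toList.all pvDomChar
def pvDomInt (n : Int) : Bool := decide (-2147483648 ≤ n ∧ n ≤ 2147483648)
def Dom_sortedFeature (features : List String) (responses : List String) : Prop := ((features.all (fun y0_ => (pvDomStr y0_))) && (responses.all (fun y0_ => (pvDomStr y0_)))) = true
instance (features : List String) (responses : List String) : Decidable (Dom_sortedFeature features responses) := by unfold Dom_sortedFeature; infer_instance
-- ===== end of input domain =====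

-- B replaces A's per-response bitmask dictionary + popcount with one pass of
-- per-response-set counting, then sorts features by the key (-count, word).

-- termination fact for the port of A's hand-written popcount loop (cited by decreasing_by)
theorem pvShiftRight_toNat_lt (n : Int) (h : 0 < n) : (n >>> (1 : Nat)).toNat < n.toNat := by
  have : n >>> (1 : Nat) = n / 2 := by simp [Int.shiftRight_eq_div_pow]
  rw [this]; omega

-- ===== PORT A =====
-- Python's `1 << i` (named so that every use elaborates to the same term)
def pvShl1 (k : Nat) : Int := (1 : Int) <<< k

-- A's inner helper `bits(n)`: while n > 0: cnt += n & 1; n >>= 1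
def pvBitsA (cnt : Int) (n : Int) : Int :=
  if h : 0 < n then pvBitsA (cnt + PySem.Int.band n 1) (n >>> (1 : Nat)) else cnt
termination_by n.toNat
decreasing_by exact pvShiftRight_toNat_lt n h

-- A's first loop: m[w] |= 1 << i  /  m[w] = 1 << i
def pvMaskA (responses : List String) : PySem.Dict String Int :=
  (PySem.List.enumerate responses 0).foldl (fun m p =>
    (PySem.Str.split₀ p.2).foldl (fun m w =>
      if m.contains w then m.insert w (PySem.Int.bor (m.getD w 0) (pvShl1 p.1.toNat))
      else m.insert w (pvShl1 p.1.toNat)) m) PySem.Dict.empty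

def sortedFeature (features : List String) (responses : List String) : List String :=
  let m := pvMaskA responses
  let pairs := features.foldl (fun acc w =>
    if m.contains w then acc ++ [(-(pvBitsA 0 (m.getD w 0)), w)]
    else acc ++ [((0 : Int), w)]) []
  (PySem.List.sorted2 pairs (fun p => p.1) (fun p => p.2)).map (fun p => p.2)

-- ===== PORT B =====
-- B's counting pass: for res in responses: for w in set(res.split()): cnt[w] = cnt.get(w,0)+1
def pvCntB (responses : List String) : PySem.Dict String Int :=
  responses.foldl (fun d res =>
    (PySem.Set.ofList (PySem.Str.split₀ res)).foldl
      (fun d w => d.insert w (d.getD w 0 + 1)) d) PySem.Dict.empty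

def sortedFeature_alt (features : List String) (responses : List String) : List String :=
  let cnt := pvCntB responses
  PySem.List.sorted2 features (fun w => -(cnt.getD w 0)) (fun w => w)

-- ===== PRECONDITION & SPEC =====
def Spec_sortedFeature (features : List String) (responses : List String) (out : List String) : Prop := out = sortedFeature_alt features responses
instance (features : List String) (responses : List String) (out : List String) : Decidable (Spec_sortedFeature features responses out) := by unfold Spec_sortedFeature; infer_instance

-- ===== CLAIM (what is proved, stated in full; the proofs are below) =====
def Claim_equal_sortedFeature : Prop := ∀ (features : List String) (responses : List String), Dom_sortedFeature features responses → Spec_sortedFeature features responses (sortedFeature features responses)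

-- ===== LEMMAS AND PROOFS =====

theorem pvLorPow (i : Nat) : ∀ v : Nat, v < 2 ^ i → v ||| 2 ^ i = v + 2 ^ i := by
  induction i with
  | zero => intro v hv; interval_cases v; decide
  | succ i ih =>
    intro v hv
    have hp : 2 ^ (i+1) = 2 * 2 ^ i := by ring
    have hd : v / 2 < 2 ^ i := by omega
    have hb : (decide (v % 2 = 1)).toNat = v % 2 := by
      rcases Nat.mod_two_eq_zero_or_one v with h | h <;> simp [h]
    have h1 : Nat.bit (decide (v % 2 = 1)) (v / 2) = v := by
      rw [Nat.bit_val, hb]; omega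
    have h2 : Nat.bit false (2 ^ i) = 2 ^ (i+1) := by rw [Nat.bit_val]; simp; ring
    calc v ||| 2 ^ (i+1) = Nat.bit (decide (v % 2 = 1)) (v / 2) ||| Nat.bit false (2 ^ i) := by
          rw [h1, h2]
      _ = Nat.bit (decide (v % 2 = 1) || false) (v / 2 ||| 2 ^ i) := Nat.lor_bit ..
      _ = v + 2 ^ (i+1) := by rw [ih _ hd, Bool.or_false, Nat.bit_val, hb]; omega

theorem pvBitCountAdd (i : Nat) : ∀ v : Nat, v < 2 ^ i →
    PySem.Int.bitCount ((v + 2 ^ i : Nat) : Int) = PySem.Int.bitCount (v : Int) + 1 := by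
  induction i with
  | zero => intro v hv; interval_cases v; decide
  | succ i ih =>
    intro v hv
    have hp : 2 ^ (i+1) = 2 * 2 ^ i := by ring
    have hd : v / 2 < 2 ^ i := by omega
    have hm : 0 < v + 2 ^ (i+1) := by positivity
    have h1 := PySem.Int.bitCount_natCast hm
    have h2 : (v + 2 ^ (i+1)) % 2 = v % 2 := by omega
    have h3 : (v + 2 ^ (i+1)) / 2 = v / 2 + 2 ^ i := by omega
    rw [h1, h2, h3, ih _ hd]
    rcases Nat.eq_zero_or_pos v with h | h
    · subst h; simp
    · rw [PySem.Int.bitCount_natCast h]; omega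

theorem pvShiftRight_one (n : Int) : n >>> (1 : Nat) = PySem.Int.floordiv n 2 := by
  simp [PySem.Int.floordiv, Int.shiftRight_eq_div_pow, Int.fdiv_eq_ediv]

theorem pvBitsA_eq (n : Int) (h : 0 ≤ n) (cnt : Int) :
    pvBitsA cnt n = cnt + PySem.Int.bitCount n := by
  have key : ∀ k : Nat, ∀ n : Int, 0 ≤ n → n.toNat = k → ∀ cnt : Int,
      pvBitsA cnt n = cnt + PySem.Int.bitCount n := by
    intro k
    induction k using Nat.strong_induction_on with
    | _ k ih =>
      intro n hn hk cnt
      by_cases h0 : 0 < n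
      · rw [pvBitsA, dif_pos h0]
        have hlt := pvShiftRight_toNat_lt n h0
        have hn' : 0 ≤ n >>> (1 : Nat) := by
          rw [pvShiftRight_one]
          have := PySem.Int.floordiv_eq_ediv_of_pos (a := n) (b := 2) (by norm_num)
          rw [this]; omega
        rw [ih (n >>> (1 : Nat)).toNat (hk ▸ hlt) _ hn' rfl]
        rw [PySem.Int.bitCount_of_pos h0, PySem.Int.band_one, pvShiftRight_one]
        have hm : 0 ≤ PySem.Int.mod n 2 := PySem.Int.mod_nonneg n (by norm_num)
        push_cast
        omega
      · have : n = 0 := by omega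
        subst this
        rw [pvBitsA]
        simp
  exact key n.toNat n h rfl cnt

theorem pvBorFresh (v : Int) (i : Nat) (h0 : 0 ≤ v) (h : v < 2 ^ i) :
    PySem.Int.bor v (pvShl1 i) = v + 2 ^ i := by
  have h2 : pvShl1 i = 2 ^ i := by simp [pvShl1, Int.shiftLeft_eq]
  have hv : v = (v.toNat : Int) := by omega
  have hpow : ((2 ^ i : Nat) : Int) = 2 ^ i := by push_cast; ring
  have hlt : v.toNat < 2 ^ i := by omega
  rw [h2, hv, ← hpow, PySem.Int.bor_natCast, pvLorPow i _ hlt]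
  push_cast; ring

theorem pvBorAbsorb (a b : Int) (ha : 0 ≤ a) (hb : 0 ≤ b) :
    PySem.Int.bor (PySem.Int.bor a b) b = PySem.Int.bor a b := by
  have hA : a = (a.toNat : Int) := by omega
  have hB : b = (b.toNat : Int) := by omega
  rw [hA, hB, PySem.Int.bor_natCast, PySem.Int.bor_natCast, Nat.lor_assoc, Nat.or_self]

theorem pvContains_iff {κ ν : Type} [BEq κ] (d : PySem.Dict κ ν) (k : κ) :
    d.contains k = (d.get? k).isSome := by
  simp [PySem.Dict.contains, PySem.Dict.get?, List.isSome_find?]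

theorem pvBorNonneg (a b : Int) (ha : 0 ≤ a) (hb : 0 ≤ b) : 0 ≤ PySem.Int.bor a b := by
  have hA : a = (a.toNat : Int) := by omega
  have hB : b = (b.toNat : Int) := by omega
  rw [hA, hB, PySem.Int.bor_natCast]; positivity

theorem pvStepA_get? (i : Nat) : ∀ (ws : List String) (m : PySem.Dict String Int),
    (∀ w v, m.get? w = some v → 0 ≤ v) → ∀ w,
    (ws.foldl (fun m w =>
      if m.contains w then m.insert w (PySem.Int.bor (m.getD w 0) (pvShl1 i))
      else m.insert w (pvShl1 i)) m).get? w
    = if w ∈ ws then some (PySem.Int.bor (m.getD w 0) (pvShl1 i)) else m.get? w := by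
  have hb : (0 : Int) ≤ pvShl1 i := by
    have : pvShl1 i = 2 ^ i := by simp [pvShl1, Int.shiftLeft_eq]
    rw [this]; positivity
  intro ws
  induction ws with
  | nil => intro m hm w; simp
  | cons x rest ih =>
    intro m hm w
    simp only [List.foldl_cons]
    have hgetD : ∀ u, 0 ≤ m.getD u 0 := by
      intro u
      simp only [PySem.Dict.getD]
      cases hu : m.get? u with
      | none => simp
      | some v => simpa using hm u v hu
    set b := pvShl1 i with hbdef
    have hmx : (if m.contains x then m.insert x (PySem.Int.bor (m.getD x 0) b)
        else m.insert x b) = m.insert x (PySem.Int.bor (m.getD x 0) b) := by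
      by_cases hc : m.contains x = true
      · simp [hc]
      · have hnone : m.get? x = none := by
          rw [pvContains_iff] at hc
          cases h : m.get? x <;> simp [h] at hc ⊢
        have : m.getD x 0 = 0 := by simp [PySem.Dict.getD, hnone]
        rw [this, PySem.Int.bor_comm, PySem.Int.bor_zero]
        simp [hc]
    rw [hmx]
    have hm' : ∀ w v, (m.insert x (PySem.Int.bor (m.getD x 0) b)).get? w = some v → 0 ≤ v := by
      intro u v hu
      by_cases hux : u = x
      · subst hux
        rw [PySem.Dict.get?_insert_self] at hu
        obtain rfl : PySem.Int.bor (m.getD u 0) b = v := by injection hu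
        exact pvBorNonneg (m.getD u 0) b (hgetD u) hb
      · rw [PySem.Dict.get?_insert_of_ne _ _ hux] at hu
        exact hm u v hu
    rw [ih _ hm' w]
    by_cases hw : w ∈ rest
    · simp only [hw, if_true, List.mem_cons, or_true, if_true]
      by_cases hwx : w = x
      · subst hwx
        have : (m.insert w (PySem.Int.bor (m.getD w 0) b)).getD w 0
            = PySem.Int.bor (m.getD w 0) b := by
          simp [PySem.Dict.getD, PySem.Dict.get?_insert_self]
        rw [this, pvBorAbsorb _ _ (hgetD w) hb]
      · have : (m.insert x (PySem.Int.bor (m.getD x 0) b)).getD w 0 = m.getD w 0 := by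
          simp [PySem.Dict.getD, PySem.Dict.get?_insert_of_ne _ _ hwx]
        rw [this]
    · simp only [hw, if_false]
      by_cases hwx : w = x
      · subst hwx
        simp [List.mem_cons, PySem.Dict.get?_insert_self]
      · rw [PySem.Dict.get?_insert_of_ne _ _ hwx]
        have : (w ∈ x :: rest) = False := by simp [hwx, hw]
        simp [this]

theorem pvBitCountFresh (v : Int) (i : Nat) (h0 : 0 ≤ v) (h : v < 2 ^ i) :
    PySem.Int.bitCount (v + 2 ^ i) = PySem.Int.bitCount v + 1 := by
  have hv : v = (v.toNat : Int) := by omega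
  have hpow : ((2 ^ i : Nat) : Int) = 2 ^ i := by push_cast; ring
  have hlt : v.toNat < 2 ^ i := by omega
  have hcast : v + 2 ^ i = ((v.toNat + 2 ^ i : Nat) : Int) := by
    push_cast [Int.toNat_of_nonneg h0]
    ring
  rw [hcast, pvBitCountAdd i _ hlt, ← hv]

theorem pvMain (rs : List String) : ∀ (s : Nat) (m d : PySem.Dict String Int),
    (∀ w, m.get? w = none → d.getD w 0 = 0) →
    (∀ w v, m.get? w = some v → 0 ≤ v ∧ v < 2 ^ s ∧ ((PySem.Int.bitCount v : Nat) : Int) = d.getD w 0) →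
    (∀ w, ((PySem.List.enumerate rs (s : Int)).foldl (fun m p =>
        (PySem.Str.split₀ p.2).foldl (fun m w =>
          if m.contains w then m.insert w (PySem.Int.bor (m.getD w 0) (pvShl1 p.1.toNat))
          else m.insert w (pvShl1 p.1.toNat)) m) m).get? w = none →
      (rs.foldl (fun d res => (PySem.Set.ofList (PySem.Str.split₀ res)).foldl
        (fun d w => d.insert w (d.getD w 0 + 1)) d) d).getD w 0 = 0) ∧
    (∀ w v, ((PySem.List.enumerate rs (s : Int)).foldl (fun m p =>
        (PySem.Str.split₀ p.2).foldl (fun m w =>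
          if m.contains w then m.insert w (PySem.Int.bor (m.getD w 0) (pvShl1 p.1.toNat))
          else m.insert w (pvShl1 p.1.toNat)) m) m).get? w = some v →
      0 ≤ v ∧ v < 2 ^ (s + rs.length) ∧ ((PySem.Int.bitCount v : Nat) : Int)
        = (rs.foldl (fun d res => (PySem.Set.ofList (PySem.Str.split₀ res)).foldl
            (fun d w => d.insert w (d.getD w 0 + 1)) d) d).getD w 0) := by
  induction rs with
  | nil =>
    intro s m d h0 h1
    constructor
    · intro w hw
      simpa using h0 w (by simpa using hw)
    · intro w v hv
      simp only [PySem.List.enumerate, List.foldl_nil] at hv ⊢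
      have := h1 w v hv
      simpa using this
  | cons res rest ih =>
    intro s m d h0 h1
    have hnn : ∀ w v, m.get? w = some v → 0 ≤ v := fun w v hv => (h1 w v hv).1
    set ws := PySem.Str.split₀ res with hws
    set m' := ws.foldl (fun m w =>
      if m.contains w then m.insert w (PySem.Int.bor (m.getD w 0) (pvShl1 s))
      else m.insert w (pvShl1 s)) m with hm'
    set d' := (PySem.Set.ofList ws).foldl (fun d w => d.insert w (d.getD w 0 + 1)) d with hd'
    have hchar : ∀ w, m'.get? w
        = if w ∈ ws then some (PySem.Int.bor (m.getD w 0) (pvShl1 s)) else m.get? w :=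
      pvStepA_get? s ws m hnn
    have hd'getD : ∀ w, d'.getD w 0 = d.getD w 0 + (if w ∈ ws then 1 else 0) := by
      intro w
      rw [hd', PySem.Dict.getD_foldl_insert_add_one]
      by_cases hw : w ∈ ws
      · rw [List.count_eq_one_of_mem (PySem.Set.nodup_ofList ws) ((PySem.Set.mem_ofList ws w).2 hw)]
        simp [hw]
      · rw [List.count_eq_zero.mpr (fun hc => hw ((PySem.Set.mem_ofList ws w).1 hc))]
        simp [hw]
    have hgetD0 : ∀ w, m.get? w = none → m.getD w 0 = 0 := by
      intro w hw; simp [PySem.Dict.getD, hw]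
    -- invariant for m', d' at s+1
    have h0' : ∀ w, m'.get? w = none → d'.getD w 0 = 0 := by
      intro w hw
      rw [hchar w] at hw
      by_cases hmem : w ∈ ws
      · simp [hmem] at hw
      · simp only [hmem, if_false] at hw
        rw [hd'getD w, h0 w hw]
        simp [hmem]
    have h1' : ∀ w v, m'.get? w = some v →
        0 ≤ v ∧ v < 2 ^ (s + 1) ∧ ((PySem.Int.bitCount v : Nat) : Int) = d'.getD w 0 := by
      intro w v hv
      rw [hchar w] at hv
      have hpow : (2 : Int) ^ (s + 1) = 2 ^ s + 2 ^ s := by ring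
      by_cases hmem : w ∈ ws
      · simp only [hmem, if_true, Option.some.injEq] at hv
        have hold : 0 ≤ m.getD w 0 ∧ m.getD w 0 < 2 ^ s ∧
            ((PySem.Int.bitCount (m.getD w 0) : Nat) : Int) + 1 = d'.getD w 0 := by
          cases hg : m.get? w with
          | none =>
            have hz := hgetD0 w hg
            rw [hz, hd'getD w, h0 w hg]
            refine ⟨le_refl 0, by positivity, ?_⟩
            simp [hmem]
          | some v0 =>
            obtain ⟨ha, hbnd, hbc⟩ := h1 w v0 hg
            have : m.getD w 0 = v0 := by simp [PySem.Dict.getD, hg]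
            rw [this, hd'getD w, ← hbc]
            exact ⟨ha, hbnd, by simp [hmem]⟩
        obtain ⟨ha, hbnd, hbc⟩ := hold
        have hfresh := pvBorFresh (m.getD w 0) s ha hbnd
        have hbcf := pvBitCountFresh (m.getD w 0) s ha hbnd
        subst hv
        rw [hfresh]
        refine ⟨by positivity, by omega, ?_⟩
        rw [hbcf]
        push_cast
        omega
      · simp only [hmem, if_false] at hv
        obtain ⟨ha, hbnd, hbc⟩ := h1 w v hv
        refine ⟨ha, by omega, ?_⟩
        rw [hd'getD w, hbc]
        simp [hmem]
    have hcast : ((s : Int) + 1) = ((s + 1 : Nat) : Int) := by push_cast; ring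
    have := ih (s + 1) m' d' h0' h1'
    rw [PySem.List.enumerate_cons, List.foldl_cons, List.foldl_cons]
    simp only [Int.toNat_natCast] at *
    rw [hcast]
    constructor
    · exact this.1
    · intro w v hv
      have hres := this.2 w v hv
      refine ⟨hres.1, ?_, hres.2.2⟩
      have : s + 1 + rest.length = s + (res :: rest).length := by simp; omega
      rw [← this]
      exact hres.2.1

theorem pvInsertByMap {α β : Type} (f : α → β) (p : β → β → Bool) (q : α → α → Bool)
    (h : ∀ a b, p (f a) (f b) = q a b) : ∀ (ys : List α) (x : α),
    PySem.List.insertBy p (f x) (ys.map f) = (PySem.List.insertBy q x ys).map f := by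
  intro ys
  induction ys with
  | nil => intro x; simp [PySem.List.insertBy]
  | cons y t ih =>
    intro x
    simp only [List.map_cons, PySem.List.insertBy]
    rw [h x y]
    by_cases hc : q x y = true
    · simp [hc]
    · simp only [Bool.not_eq_true] at hc
      simp [hc, ih x]

theorem pvFoldlInsertByMap {α β : Type} (f : α → β) (p : β → β → Bool) (q : α → α → Bool)
    (h : ∀ a b, p (f a) (f b) = q a b) : ∀ (l : List α) (zs : List α),
    (l.map f).foldl (fun acc x => PySem.List.insertBy p x acc) (zs.map f)
    = (l.foldl (fun acc x => PySem.List.insertBy q x acc) zs).map f := by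
  intro l
  induction l with
  | nil => intro zs; simp
  | cons x t ih =>
    intro zs
    simp only [List.map_cons, List.foldl_cons]
    rw [pvInsertByMap f p q h zs x]
    exact ih (PySem.List.insertBy q x zs)

theorem pvSortedMap (features : List String) (k : String → Int) :
    PySem.List.sorted2 (features.map (fun w => (k w, w))) (fun p => p.1) (fun p => p.2)
    = (PySem.List.sorted2 features k (fun w => w)).map (fun w => (k w, w)) := by
  simp only [PySem.List.sorted2, if_neg (by decide : ¬ (false = true))]
  have := pvFoldlInsertByMap (fun w => (k w, w))
    (fun a b => decide (a.1 < b.1) || !decide (b.1 < a.1) && decide (a.2 < b.2))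
    (fun a b => decide (k a < k b) || !decide (k b < k a) && decide (a < b))
    (fun a b => rfl) features []
  simpa using this

theorem pvKeyEq (responses : List String) (w : String) :
    (if (pvMaskA responses).contains w
     then -(pvBitsA 0 ((pvMaskA responses).getD w 0))
     else (0 : Int)) = -((pvCntB responses).getD w 0) := by
  have hempty : ∀ u : String, (PySem.Dict.empty (κ := String) (ν := Int)).get? u = none := by
    intro u; simp [PySem.Dict.empty, PySem.Dict.get?]
  have h0 : ∀ u : String, (PySem.Dict.empty (κ := String) (ν := Int)).get? u = none →
      (PySem.Dict.empty (κ := String) (ν := Int)).getD u 0 = 0 := by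
    intro u _; simp [PySem.Dict.empty, PySem.Dict.getD, PySem.Dict.get?]
  have h1 : ∀ (u : String) (v : Int), (PySem.Dict.empty (κ := String) (ν := Int)).get? u = some v →
      0 ≤ v ∧ v < 2 ^ (0 : Nat) ∧ ((PySem.Int.bitCount v : Nat) : Int)
        = (PySem.Dict.empty (κ := String) (ν := Int)).getD u 0 := by
    intro u v hv; rw [hempty u] at hv; cases hv
  have hmain := pvMain responses 0 PySem.Dict.empty PySem.Dict.empty h0 h1
  simp only [Nat.cast_zero] at hmain
  obtain ⟨H0, H1⟩ := hmain
  rw [pvContains_iff]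
  cases hg : (pvMaskA responses).get? w with
  | none =>
    have hz : (pvCntB responses).getD w 0 = 0 := by
      rw [pvCntB]
      exact H0 w (by rw [pvMaskA] at hg; exact hg)
    simp [hz]
  | some v =>
    obtain ⟨hnn, _, hbc⟩ := H1 w v (by rw [pvMaskA] at hg; exact hg)
    have hgd : (pvMaskA responses).getD w 0 = v := by simp [PySem.Dict.getD, hg]
    simp only [Option.isSome_some, if_pos, hgd]
    rw [pvBitsA_eq v hnn 0, zero_add]
    rw [← pvCntB] at hbc
    rw [← hbc]

-- ===== VERDICT (by name: the statement is the Claim_ definition above) =====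
theorem sortedFeature_spec : Claim_equal_sortedFeature := by
  unfold Claim_equal_sortedFeature
  intro features responses _
  unfold Spec_sortedFeature sortedFeature sortedFeature_alt
  show (PySem.List.sorted2 (features.foldl (fun acc w =>
      if (pvMaskA responses).contains w
      then acc ++ [(-(pvBitsA 0 ((pvMaskA responses).getD w 0)), w)]
      else acc ++ [((0 : Int), w)]) []) (fun p => p.1) (fun p => p.2)).map (fun p => p.2)
    = PySem.List.sorted2 features (fun w => -((pvCntB responses).getD w 0)) (fun w => w)
  have hstep : ∀ (acc : List (Int × String)) (w : String), w ∈ features →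
      (if (pvMaskA responses).contains w
       then acc ++ [(-(pvBitsA 0 ((pvMaskA responses).getD w 0)), w)]
       else acc ++ [((0 : Int), w)])
      = acc ++ [(-((pvCntB responses).getD w 0), w)] := by
    intro acc w _
    have := pvKeyEq responses w
    by_cases hc : (pvMaskA responses).contains w = true
    · rw [if_pos hc]; rw [if_pos hc] at this; rw [this]
    · rw [if_neg hc]; rw [if_neg hc] at this; rw [← this]
  have hfold := PySem.List.foldl_congr_mem features _ _ ([] : List (Int × String)) hstep
  rw [hfold]
  rw [PySem.List.foldl_append_singleton_eq_map (fun w => (-((pvCntB responses).getD w 0), w)) features [], List.nil_append]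
  rw [pvSortedMap features (fun w => -((pvCntB responses).getD w 0))]
  rw [List.map_map]
  exact List.map_id _
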